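-- pv_equiv track=rewrite | github.com/Air2air/z-beam-generator | metadata/yaml_formatter.py | _fix_malformed_array_objects
-- ===== SOURCE A (Python) =====
-- def _fix_malformed_array_objects(text: str) -> str:
--     """Fix malformed objects with dash on separate line."""
--     lines = text.split('\n')
--     fixed_lines = []
--     i = 0
--
--     while i < len(lines):
--         line = lines[i]
--
--         # Check if this is an array marker line followed by object properties
--         if (line.strip() == '-' and
--             i + 1 < len(lines) and
--             lines[i + 1].strip() and
--             ':' in lines[i + 1] and
--             not lines[i + 1].strip().startswith('-')):
--
--             # This is a malformed array object
--             fixed_lines.append('  -')  # Proper array marker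
--             i += 1
--
--             # Process the object properties
--             while i < len(lines) and lines[i].strip() and not lines[i].strip().startswith('-'):
--                 prop_line = lines[i]
--                 if ':' in prop_line:
--                     # Ensure proper indentation for object properties
--                     fixed_lines.append('    ' + prop_line.strip())
--                 else:
--                     fixed_lines.append(prop_line)
--                 i += 1
--
--             # Don't increment i again since we handled it in the loop
--             continue
--         else:
--             fixed_lines.append(line)
--             i += 1
--
--     return '\n'.join(fixed_lines)
-- ===== SOURCE B (Python) =====
-- def _fix_malformed_array_objects(text: str) -> str:
--     """Fix malformed objects with dash on separate line.
--
--     Staged decomposition: (1) classify every line as a marker independently of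
--     any loop state, (2) compute block membership by a prefix scan over the
--     classification, (3) render each line from its own flags.  Markerhood is
--     state-independent because A's inner loop always stops at a line stripping
--     to '-' and reprocesses it, so the marker test only ever sees line i and i+1.
--     """
--     lines = text.split('\n')
--
--     def plain(l):
--         s = l.strip()
--         return bool(s) and not s.startswith('-')
--
--     # Pass 1: a line is a marker iff it strips to '-' and the next line is a
--     # plain property line containing ':' (pad with '' so the last line never is).
--     marker = [l.strip() == '-' and plain(nxt) and ':' in nxt
--               for l, nxt in zip(lines, lines[1:] + [''])]
--
--     # Pass 2: a line is inside a block iff it is plain and the nearest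
--     # preceding non-plain line is a marker.
--     in_block = []
--     last_marker = False
--     for l, mk in zip(lines, marker):
--         in_block.append(last_marker and plain(l))
--         if not plain(l):
--             last_marker = mk
--
--     # Pass 3: render.
--     def render(l, mk, ib):
--         if mk:
--             return '  -'
--         if ib:
--             return '    ' + l.strip() if ':' in l else l
--         return l
--
--     return '\n'.join(render(l, mk, ib) for l, mk, ib in zip(lines, marker, in_block))
-- ===== Notes on version B (the rewrite author's own statement) =====
-- stated objective: alternative
-- what changed: Replaced A's stateful nested-while rescan by three staged passes: a state-independent marker classification of every line, a prefix scan computing block membership, and a pure per-line render; correctness rests on markerhood depending only on a line and its successor.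
import Mathlib
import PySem

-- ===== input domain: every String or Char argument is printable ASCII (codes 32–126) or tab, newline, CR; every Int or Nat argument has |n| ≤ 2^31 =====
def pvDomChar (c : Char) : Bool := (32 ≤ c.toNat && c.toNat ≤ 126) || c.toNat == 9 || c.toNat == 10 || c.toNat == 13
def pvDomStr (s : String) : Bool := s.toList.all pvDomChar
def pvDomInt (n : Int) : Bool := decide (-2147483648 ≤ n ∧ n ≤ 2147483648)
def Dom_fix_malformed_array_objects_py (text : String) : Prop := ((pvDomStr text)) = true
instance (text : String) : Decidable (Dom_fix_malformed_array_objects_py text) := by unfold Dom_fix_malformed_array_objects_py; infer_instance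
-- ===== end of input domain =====

-- B replaces A's stateful nested-while rescan by three staged passes (classify markers, scan block membership, render); objective: alternative.
-- ===== PORT A =====
mutual
def pvAOuter : List String → List String
  | [] => []
  | line :: rest =>
    if (PySem.Str.strip line == "-") &&
       (match rest with
        | nxt :: _ => (PySem.Str.strip nxt != "") && PySem.Str.isIn ":" nxt &&
                      !(PySem.Str.startswith (PySem.Str.strip nxt) "-")
        | [] => false)
    then "  -" :: pvAInner rest
    else line :: pvAOuter rest
  termination_by xs => 2 * xs.length
  decreasing_by all_goals (simp; try omega)
def pvAInner : List String → List String
  | [] => []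
  | l :: rest =>
    if (PySem.Str.strip l != "") && !(PySem.Str.startswith (PySem.Str.strip l) "-")
    then (if PySem.Str.isIn ":" l then "    " ++ PySem.Str.strip l else l) :: pvAInner rest
    else pvAOuter (l :: rest)
  termination_by xs => 2 * xs.length + 1
  decreasing_by all_goals (simp; try omega)
end

def fix_malformed_array_objects_py (text : String) : String :=
  PySem.Str.join "\n" (pvAOuter ((PySem.Str.split? text "\n").getD []))

-- ===== PORT B =====
-- plain(l): stripped line is non-empty and does not start with '-'
def pvPlain (l : String) : Bool :=
  (PySem.Str.strip l != "") && !(PySem.Str.startswith (PySem.Str.strip l) "-")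

-- Pass 1: marker[i] from line i and its successor (padded with '')
def pvMark (l nxt : String) : Bool :=
  (PySem.Str.strip l == "-") && pvPlain nxt && PySem.Str.isIn ":" nxt

def pvMarks : List String → List Bool
  | [] => []
  | [l] => [pvMark l ""]
  | l :: nxt :: rest => pvMark l nxt :: pvMarks (nxt :: rest)

-- Pass 2: prefix scan carrying the marker flag of the nearest preceding non-plain line
def pvInBlock : Bool → List String → List Bool → List Bool
  | _, [], _ => []
  | _, _ :: _, [] => []
  | lm, l :: ls, mk :: mks =>
    (lm && pvPlain l) :: pvInBlock (if pvPlain l then lm else mk) ls mks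

-- Pass 3: render each line from its own flags
def pvRender (l : String) (mk ib : Bool) : String :=
  if mk then "  -"
  else if ib then (if PySem.Str.isIn ":" l then "    " ++ PySem.Str.strip l else l)
  else l

def pvZipRender : List String → List Bool → List Bool → List String
  | l :: ls, mk :: mks, ib :: ibs => pvRender l mk ib :: pvZipRender ls mks ibs
  | _, _, _ => []

def fix_malformed_array_objects_py_alt (text : String) : String :=
  let lines := (PySem.Str.split? text "\n").getD []
  let marker := pvMarks lines
  PySem.Str.join "\n" (pvZipRender lines marker (pvInBlock false lines marker))

-- ===== PRECONDITION & SPEC =====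
def Spec_fix_malformed_array_objects_py (text : String) (out : String) : Prop := out = fix_malformed_array_objects_py_alt text
instance (text : String) (out : String) : Decidable (Spec_fix_malformed_array_objects_py text out) := by unfold Spec_fix_malformed_array_objects_py; infer_instance

-- ===== CLAIM (what is proved, stated in full; the proofs are below) =====
def Claim_equal_fix_malformed_array_objects_py : Prop := ∀ (text : String), Dom_fix_malformed_array_objects_py text → Spec_fix_malformed_array_objects_py text (fix_malformed_array_objects_py text)

-- ===== LEMMAS AND PROOFS =====
-- Proof-only intermediate: A's two loops as one state machine with a Bool flag.
def pvMarkOf (l : String) : List String → Bool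
  | nxt :: _ => pvMark l nxt
  | [] => pvMark l ""

def pvMid : Bool → List String → List String
  | _, [] => []
  | inObj, line :: rest =>
    if inObj && pvPlain line then
      (if PySem.Str.isIn ":" line then "    " ++ PySem.Str.strip line else line) :: pvMid true rest
    else
      if pvMarkOf line rest
      then "  -" :: pvMid true rest
      else line :: pvMid false rest

def pvNextOk : List String → Bool
  | nxt :: _ => (PySem.Str.strip nxt != "") && PySem.Str.isIn ":" nxt &&
                !(PySem.Str.startswith (PySem.Str.strip nxt) "-")
  | [] => false

theorem pvAOuter_nil : pvAOuter [] = [] := by rw [pvAOuter.eq_def]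
theorem pvAInner_nil : pvAInner [] = [] := by rw [pvAInner.eq_def]

theorem pvMark_head (l : String) (r : List String) :
    ((PySem.Str.strip l == "-") && pvNextOk r) = pvMarkOf l r := by
  have key : ∀ d a b c : Bool, (d && (a && b && c)) = (d && (a && c) && b) := by decide
  cases r with
  | nil =>
    have h0 : pvPlain "" = false := by decide
    simp [pvNextOk, pvMarkOf, pvMark, h0]
  | cons nxt t =>
    simp only [pvNextOk, pvMarkOf, pvMark, pvPlain]
    exact key _ _ _ _

theorem pvAOuter_cons (l : String) (r : List String) :
    pvAOuter (l :: r) =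
      if pvMarkOf l r
      then "  -" :: pvAInner r else l :: pvAOuter r := by
  rw [pvAOuter.eq_def, ← pvMark_head]; cases r <;> rfl
theorem pvAInner_cons (l : String) (r : List String) :
    pvAInner (l :: r) =
      if pvPlain l
      then (if PySem.Str.isIn ":" l then "    " ++ PySem.Str.strip l else l) :: pvAInner r
      else pvAOuter (l :: r) := by
  rw [pvAInner.eq_def]; rfl

-- A's mutual pair equals the state machine.
theorem pvLoop_eq (xs : List String) :
    pvAOuter xs = pvMid false xs ∧ pvAInner xs = pvMid true xs := by
  induction xs with
  | nil => simp [pvAOuter_nil, pvAInner_nil, pvMid]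
  | cons l r ih =>
    have h1 : pvAOuter (l :: r) = pvMid false (l :: r) := by
      rw [pvAOuter_cons, pvMid]
      simp only [Bool.false_and, Bool.false_eq_true, if_false]
      split <;> simp [ih.1, ih.2]
    refine ⟨h1, ?_⟩
    rw [pvAInner_cons]
    by_cases hc : pvPlain l = true
    · rw [if_pos hc]
      conv_rhs => rw [pvMid]
      rw [Bool.true_and, if_pos hc, ih.2]
    · rw [if_neg hc, h1]
      conv_rhs => rw [pvMid]
      conv_lhs => rw [pvMid]
      rw [Bool.true_and, Bool.false_and]
      simp [hc]

theorem pvPlain_not_dash (l : String) (h : pvPlain l = true) :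
    (PySem.Str.strip l == "-") = false := by
  by_cases hd : PySem.Str.strip l = "-"
  · exfalso
    unfold pvPlain at h
    rw [hd] at h
    exact absurd h (by decide)
  · simp [hd]

theorem pvMarks_cons (l : String) (r : List String) :
    pvMarks (l :: r) = pvMarkOf l r :: pvMarks r := by
  cases r <;> rfl

theorem pvPlain_not_mark (l : String) (r : List String) (h : pvPlain l = true) :
    pvMarkOf l r = false := by
  rw [← pvMark_head, pvPlain_not_dash l h, Bool.false_and]

-- The state machine equals B's staged passes (for any carried flag).
theorem pvMid_eq_staged (xs : List String) (lm : Bool) :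
    pvMid lm xs = pvZipRender xs (pvMarks xs) (pvInBlock lm xs (pvMarks xs)) := by
  induction xs generalizing lm with
  | nil => simp [pvMid, pvZipRender]
  | cons l r ih =>
    rw [pvMid, pvMarks_cons, pvInBlock, pvZipRender]
    by_cases hp : pvPlain l = true
    · have hmk0 : pvMarkOf l r = false := pvPlain_not_mark l r hp
      cases lm with
      | true =>
        rw [Bool.true_and, if_pos hp, ih]
        simp [pvRender, hmk0, hp]
      | false =>
        rw [Bool.false_and]
        simp only [Bool.false_eq_true, if_false, hmk0, pvRender]
        rw [ih]
        simp [hp]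
    · have hp' : pvPlain l = false := by simpa using hp
      rw [hp', Bool.and_false]
      simp only [Bool.false_eq_true, if_false, pvRender]
      cases hmkc : pvMarkOf l r with
      | true => simp [ih]
      | false => simp [ih]

-- ===== VERDICT (by name: the statement is the Claim_ definition above) =====
theorem fix_malformed_array_objects_py_spec : Claim_equal_fix_malformed_array_objects_py := by
  intro text _
  unfold Spec_fix_malformed_array_objects_py fix_malformed_array_objects_py fix_malformed_array_objects_py_alt
  rw [(pvLoop_eq _).1, pvMid_eq_staged]
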